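-- pv_equiv track=rewrite | github.com/AGasowski/football-data-analysis-full-project | project/src/fonctions_communes.py | trier_dict
-- ===== SOURCE A (Python) =====
-- def trier_dict(data, cles, reverse=True):
--     """
--     Trie un dictionnaire selon une ou plusieurs clés internes.
--
--     Paramètres
--     ----------
--     dict : dict
--         Dictionnaire dont les valeurs sont elles-mêmes des dictionnaires
--         contenant les clés de tri. Par exemple : {"PSG": {"points": 80,
--         "goal_diff": 45}, ...}
--     clés : list of str
--         Liste des clés internes servant à trier les éléments du dictionnaire.
--         Le tri se fait dans l’ordre des clés fournies (de la plus prioritaire à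
--         la moins prioritaire).
--     reverse : bool, optional
--         Si True (par défaut), effectue un tri décroissant. Si False, le tri est
--         croissant.
--
--     Retourne
--     -------
--     dict
--         Nouveau dictionnaire trié selon les critères donnés, avec les paires
--         clé/valeur dans l’ordre défini.
--     """
--     return dict(
--         sorted(
--             data.items(),
--             key=lambda item: tuple(item[1][key] for key in cles),
--             reverse=reverse,
--         )
--     )
-- ===== SOURCE B (Python) =====
-- def trier_dict(data, cles, reverse=True):
--     # k stable single-key insertion-sort passes, least-significant key first,
--     # instead of one built-in sort with a composite tuple key.
--     items = list(data.items())
--     for key in reversed(cles):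
--         out = []
--         for it in items:
--             j = 0
--             if reverse:
--                 while j < len(out) and not (out[j][1][key] < it[1][key]):
--                     j += 1
--             else:
--                 while j < len(out) and not (it[1][key] < out[j][1][key]):
--                     j += 1
--             out.insert(j, it)
--         items = out
--     return dict(items)
-- ===== Notes on version B (the rewrite author's own statement) =====
-- stated objective: alternative
-- what changed: Replaces the single built-in sort on a composite tuple key by k hand-written stable single-key insertion-sort passes applied least-significant key first, each pass inserting every item before the first element it strictly precedes under that key.
import Mathlib
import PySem

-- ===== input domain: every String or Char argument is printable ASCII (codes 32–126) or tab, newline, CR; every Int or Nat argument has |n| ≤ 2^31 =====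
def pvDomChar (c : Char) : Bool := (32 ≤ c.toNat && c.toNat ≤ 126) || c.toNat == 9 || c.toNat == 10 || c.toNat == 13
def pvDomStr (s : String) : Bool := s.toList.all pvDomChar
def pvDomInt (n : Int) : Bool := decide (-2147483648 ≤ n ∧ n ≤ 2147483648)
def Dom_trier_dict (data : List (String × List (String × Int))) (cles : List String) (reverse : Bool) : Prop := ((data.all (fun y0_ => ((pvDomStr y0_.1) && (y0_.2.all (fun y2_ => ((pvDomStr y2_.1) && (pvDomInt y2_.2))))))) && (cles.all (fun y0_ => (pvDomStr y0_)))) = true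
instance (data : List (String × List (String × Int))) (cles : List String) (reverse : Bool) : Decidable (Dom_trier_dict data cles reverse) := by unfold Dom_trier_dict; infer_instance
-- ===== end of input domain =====

-- B replaces A's single built-in composite-tuple-key sort by k hand-written stable
-- single-key insertion-sort passes, least-significant key first (objective: alternative).


-- ===== PORT A =====
-- dict(sorted(data.items(), key=lambda item: tuple(item[1][key] for key in cles), reverse=reverse));
-- the tuple key is a List Int compared lexicographically; item[1][key] is Dict.getD (exact under
-- Pre_, which guarantees every key of cles is present, exactly where Python raises no KeyError).
def trier_dict (data : List (String × List (String × Int))) (cles : List String) (reverse : Bool) : List (String × List (String × Int)) :=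
  (PySem.Dict.ofList (PySem.List.sorted (PySem.Dict.ofList data).items
      (fun item => cles.map (fun c => PySem.Dict.getD (PySem.Dict.ofList item.2) c 0)) reverse)).items

-- ===== PORT B =====
-- The inner while/insert of Source B: walk `out` from the front past every element `it` does not
-- strictly precede under key `c`, and place `it` there (it[1][key] is Dict.getD, exact under Pre_).
def pvIns (reverse : Bool) (c : String) (it : String × List (String × Int)) :
    List (String × List (String × Int)) → List (String × List (String × Int))
  | [] => [it]
  | y :: ys =>
      if (if reverse
          then PySem.Dict.getD (PySem.Dict.ofList y.2) c 0 < PySem.Dict.getD (PySem.Dict.ofList it.2) c 0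
          else PySem.Dict.getD (PySem.Dict.ofList it.2) c 0 < PySem.Dict.getD (PySem.Dict.ofList y.2) c 0)
      then it :: y :: ys
      else y :: pvIns reverse c it ys

-- items = list(data.items()); for key in reversed(cles): one insertion-sort pass on `key`; dict(items)
def trier_dict_alt (data : List (String × List (String × Int))) (cles : List String) (reverse : Bool) : List (String × List (String × Int)) :=
  (PySem.Dict.ofList (cles.reverse.foldl
      (fun items c => items.foldl (fun out it => pvIns reverse c it out) [])
      (PySem.Dict.ofList data).items)).items

-- ===== PRECONDITION & SPEC =====
-- Pre_ excludes exactly the inputs on which Python raises KeyError: some sort key of cles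
-- missing from some inner dict of the (dict-normalised) data.
def Pre_trier_dict (data : List (String × List (String × Int))) (cles : List String) (reverse : Bool) : Prop :=
  ∀ p ∈ (PySem.Dict.ofList data).items, ∀ c ∈ cles, (PySem.Dict.ofList p.2).contains c = true
instance (data : List (String × List (String × Int))) (cles : List String) (reverse : Bool) : Decidable (Pre_trier_dict data cles reverse) := by unfold Pre_trier_dict; infer_instance

def pvWitness_trier_dict : (List (String × List (String × Int))) × List String × Bool :=
  ([("PSG", [("points", 80), ("gd", 45)]), ("OM", [("points", 80), ("gd", 30)])], ["points", "gd"], true)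

def Spec_trier_dict (data : List (String × List (String × Int))) (cles : List String) (reverse : Bool) (out : List (String × List (String × Int))) : Prop := out = trier_dict_alt data cles reverse
instance (data : List (String × List (String × Int))) (cles : List String) (reverse : Bool) (out : List (String × List (String × Int))) : Decidable (Spec_trier_dict data cles reverse out) := by unfold Spec_trier_dict; infer_instance

-- ===== CLAIM (what is proved, stated in full; the proofs are below) =====
def Claim_equal_trier_dict : Prop := ∀ (data : List (String × List (String × Int))) (cles : List String) (reverse : Bool), Dom_trier_dict data cles reverse → Pre_trier_dict data cles reverse → Spec_trier_dict data cles reverse (trier_dict data cles reverse)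

-- ===== LEMMAS AND PROOFS =====

-- The stable insertion sort with comparator b, as the foldl PySem.List.sorted unfolds to.
def sortB {α : Type} (b : α → α → Bool) (xs : List α) : List α :=
  xs.foldl (fun acc x => PySem.List.insertBy b x acc) []

theorem sortB_nil {α : Type} (b : α → α → Bool) : sortB b [] = [] := rfl

theorem sortB_append {α : Type} (b : α → α → Bool) (xs ys : List α) :
    sortB b (xs ++ ys) = ys.foldl (fun acc x => PySem.List.insertBy b x acc) (sortB b xs) := by
  simp [sortB, List.foldl_append]

theorem insertBy_nil {α : Type} (b : α → α → Bool) (x : α) : PySem.List.insertBy b x [] = [x] := rfl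

theorem insertBy_cons {α : Type} (b : α → α → Bool) (x y : α) (ys : List α) :
    PySem.List.insertBy b x (y :: ys) =
      if b x y then x :: y :: ys else y :: PySem.List.insertBy b x ys := rfl

-- B's hand-written insertion is insertBy with the single-key comparator.
theorem pvIns_eq_insertBy (reverse : Bool) (c : String) (it : String × List (String × Int))
    (l : List (String × List (String × Int))) :
    pvIns reverse c it l =
      PySem.List.insertBy
        (fun a y => if reverse
          then decide (PySem.Dict.getD (PySem.Dict.ofList y.2) c 0 < PySem.Dict.getD (PySem.Dict.ofList a.2) c 0)
          else decide (PySem.Dict.getD (PySem.Dict.ofList a.2) c 0 < PySem.Dict.getD (PySem.Dict.ofList y.2) c 0))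
        it l := by
  induction l with
  | nil => rfl
  | cons y ys ih =>
      rw [pvIns, insertBy_cons, ih]
      cases reverse <;> simp

theorem insertBy_perm {α : Type} (b : α → α → Bool) (x : α) (l : List α) :
    (PySem.List.insertBy b x l).Perm (x :: l) := by
  induction l with
  | nil => simp [insertBy_nil]
  | cons y ys ih =>
      rw [insertBy_cons]
      split
      · exact List.Perm.refl _
      · exact (ih.cons y).trans (List.Perm.swap x y ys)

theorem mem_insertBy' {α : Type} {b : α → α → Bool} {x w : α} {l : List α}
    (h : w ∈ PySem.List.insertBy b x l) : w = x ∨ w ∈ l := by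
  have := (insertBy_perm b x l).mem_iff.mp h
  simpa using this

theorem insertBy_congr {α : Type} (b b' : α → α → Bool) (x : α) (l : List α)
    (h : ∀ w ∈ l, b x w = b' x w) : PySem.List.insertBy b x l = PySem.List.insertBy b' x l := by
  induction l with
  | nil => rfl
  | cons y ys ih =>
      rw [insertBy_cons, insertBy_cons, h y (by simp)]
      split
      · rfl
      · rw [ih (fun w hw => h w (by simp [hw]))]

-- Pairwise-sortedness (no later element strictly precedes an earlier one) is preserved by insertBy.
theorem insertBy_pairwise {α : Type} {b : α → α → Bool}
    (ha : ∀ p q, b p q = true → b q p = false)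
    (ht : ∀ p q r, b p q = true → b r q = false → b p r = true)
    {l : List α} (hl : l.Pairwise (fun a c => b c a = false)) (x : α) :
    (PySem.List.insertBy b x l).Pairwise (fun a c => b c a = false) := by
  induction l with
  | nil => simp [insertBy_nil]
  | cons y ys ih =>
      rw [List.pairwise_cons] at hl
      obtain ⟨hy, hys⟩ := hl
      rw [insertBy_cons]
      by_cases hbxy : b x y = true
      · rw [if_pos hbxy]
        refine List.Pairwise.cons ?_ (List.Pairwise.cons hy hys)
        intro z hz
        rcases List.mem_cons.mp hz with rfl | hz
        · exact ha _ _ hbxy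
        · exact ha _ _ (ht _ _ _ hbxy (hy z hz))
      · rw [if_neg hbxy]
        refine List.Pairwise.cons ?_ (ih hys)
        intro z hz
        rcases mem_insertBy' hz with rfl | hz
        · simpa using hbxy
        · exact hy z hz

theorem sortB_pairwise {α : Type} {b : α → α → Bool}
    (ha : ∀ p q, b p q = true → b q p = false)
    (ht : ∀ p q r, b p q = true → b r q = false → b p r = true)
    (xs : List α) : (sortB b xs).Pairwise (fun a c => b c a = false) := by
  induction xs using List.reverseRecOn with
  | nil => simp [sortB_nil]
  | append_singleton xs x ih =>
      rw [sortB_append]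
      simpa using insertBy_pairwise ha ht ih x

theorem sortB_perm {α : Type} (b : α → α → Bool) (xs : List α) : (sortB b xs).Perm xs := by
  induction xs using List.reverseRecOn with
  | nil => simp [sortB_nil]
  | append_singleton xs x ih =>
      rw [sortB_append]
      simp only [List.foldl_cons, List.foldl_nil]
      exact ((insertBy_perm b x _).trans (ih.cons x)).trans
        (List.perm_append_comm (l₁ := [x]) (l₂ := xs))

-- The key commuting step: inserting z by the primary order commutes with inserting x by the
-- lexicographic order, provided x strictly precedes z in the secondary order.
theorem insertBy_comm_step {α : Type} {b1 b2 bc : α → α → Bool}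
    (hbc : ∀ x y, bc x y = (b1 x y || (!b1 x y && !b1 y x && b2 x y)))
    (ha1 : ∀ p q, b1 p q = true → b1 q p = false)
    (ht1 : ∀ p q r, b1 p q = true → b1 r q = false → b1 p r = true)
    {x z : α} (hxz : b2 x z = true) (A : List α) :
    PySem.List.insertBy b1 z (PySem.List.insertBy bc x A) =
      PySem.List.insertBy bc x (PySem.List.insertBy b1 z A) := by
  have hbczt : b1 z x = false → bc x z = true := by
    intro h
    rw [hbc]
    cases hb1 : b1 x z <;> simp [hb1, h, hxz]
  have hbczf : b1 z x = true → bc x z = false := by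
    intro h
    rw [hbc]
    simp [ha1 _ _ h, h]
  induction A with
  | nil =>
      by_cases h1 : b1 z x = true
      · simp [insertBy_nil, insertBy_cons, h1, hbczf h1]
      · simp only [Bool.not_eq_true] at h1
        simp [insertBy_nil, insertBy_cons, h1, hbczt h1]
  | cons a A ih =>
      by_cases hca : bc x a = true
      · have haxf : b1 a x = false := by
          rw [hbc] at hca
          cases hax : b1 a x
          · rfl
          · rw [hax, ha1 _ _ hax] at hca; simp at hca
        by_cases h1 : b1 z x = true
        · have hza : b1 z a = true := ht1 z x a h1 haxf
          simp [insertBy_cons, hca, h1, hza, hbczf h1]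
        · simp only [Bool.not_eq_true] at h1
          by_cases hza : b1 z a = true
          · simp [insertBy_cons, hca, h1, hza, hbczt h1]
          · simp only [Bool.not_eq_true] at hza
            simp [insertBy_cons, hca, h1, hza, hbczt h1]
      · simp only [Bool.not_eq_true] at hca
        have hxaf : b1 x a = false := by
          rw [hbc] at hca
          cases h : b1 x a
          · rfl
          · rw [h] at hca; simp at hca
        by_cases hza : b1 z a = true
        · have hzx : b1 z x = true := ht1 z a x hza hxaf
          simp [insertBy_cons, hca, hza, hzx, hbczf hzx]
        · simp only [Bool.not_eq_true] at hza
          simp [insertBy_cons, hca, hza, ih]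

theorem foldl_insertBy_comm {α : Type} {b1 b2 bc : α → α → Bool}
    (hbc : ∀ x y, bc x y = (b1 x y || (!b1 x y && !b1 y x && b2 x y)))
    (ha1 : ∀ p q, b1 p q = true → b1 q p = false)
    (ht1 : ∀ p q r, b1 p q = true → b1 r q = false → b1 p r = true)
    {x : α} (m : List α) (hm : ∀ z ∈ m, b2 x z = true) (A : List α) :
    m.foldl (fun acc z => PySem.List.insertBy b1 z acc) (PySem.List.insertBy bc x A) =
      PySem.List.insertBy bc x (m.foldl (fun acc z => PySem.List.insertBy b1 z acc) A) := by
  induction m generalizing A with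
  | nil => rfl
  | cons z m ih =>
      simp only [List.foldl_cons]
      rw [insertBy_comm_step hbc ha1 ht1 (hm z (by simp)), ih (fun w hw => hm w (by simp [hw]))]

-- In a b2-sorted list, insertBy b2 splits the list into a prefix x does not precede
-- and a suffix x strictly precedes.
theorem insertBy_split2 {α : Type} {b2 : α → α → Bool}
    (ht2 : ∀ p q r, b2 p q = true → b2 r q = false → b2 p r = true)
    (x : α) (l : List α) (hl : l.Pairwise (fun a c => b2 c a = false)) :
    ∃ t d, l = t ++ d ∧ PySem.List.insertBy b2 x l = t ++ x :: d ∧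
      (∀ w ∈ t, b2 x w = false) ∧ (∀ z ∈ d, b2 x z = true) := by
  induction l with
  | nil => exact ⟨[], [], rfl, rfl, by simp, by simp⟩
  | cons y ys ih =>
      rw [List.pairwise_cons] at hl
      obtain ⟨hy, hys⟩ := hl
      by_cases hb : b2 x y = true
      · refine ⟨[], y :: ys, rfl, by simp [insertBy_cons, hb], by simp, ?_⟩
        intro z hz
        rcases List.mem_cons.mp hz with rfl | hz
        · exact hb
        · exact ht2 x y z hb (hy z hz)
      · simp only [Bool.not_eq_true] at hb
        obtain ⟨t, d, hl_eq, hins, htk, hd⟩ := ih hys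
        refine ⟨y :: t, d, by simp [hl_eq], by simp [insertBy_cons, hb, hins], ?_, hd⟩
        intro w hw
        rcases List.mem_cons.mp hw with rfl | hw
        · exact hb
        · exact htk w hw

-- sortB b1 after a b2-insertion into a b2-sorted list = bc-insertion into sortB b1.
theorem sortB_insert {α : Type} {b1 b2 bc : α → α → Bool}
    (hbc : ∀ x y, bc x y = (b1 x y || (!b1 x y && !b1 y x && b2 x y)))
    (ha1 : ∀ p q, b1 p q = true → b1 q p = false)
    (ht1 : ∀ p q r, b1 p q = true → b1 r q = false → b1 p r = true)
    (ht2 : ∀ p q r, b2 p q = true → b2 r q = false → b2 p r = true)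
    (x : α) (l : List α) (hl : l.Pairwise (fun a c => b2 c a = false)) :
    sortB b1 (PySem.List.insertBy b2 x l) = PySem.List.insertBy bc x (sortB b1 l) := by
  obtain ⟨t, d, hl_eq, hins, htk, hd⟩ := insertBy_split2 ht2 x l hl
  rw [hins, hl_eq, sortB_append]
  simp only [List.foldl_cons]
  have hcong : PySem.List.insertBy b1 x (sortB b1 t) = PySem.List.insertBy bc x (sortB b1 t) := by
    refine insertBy_congr b1 bc x _ (fun w hw => ?_)
    have hwt : w ∈ t := (sortB_perm b1 t).mem_iff.mp hw
    rw [hbc, htk w hwt]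
    simp
  rw [hcong, foldl_insertBy_comm hbc ha1 ht1 d hd, ← sortB_append]

theorem sortB_lex {α : Type} {b1 b2 bc : α → α → Bool}
    (hbc : ∀ x y, bc x y = (b1 x y || (!b1 x y && !b1 y x && b2 x y)))
    (ha1 : ∀ p q, b1 p q = true → b1 q p = false)
    (ht1 : ∀ p q r, b1 p q = true → b1 r q = false → b1 p r = true)
    (ha2 : ∀ p q, b2 p q = true → b2 q p = false)
    (ht2 : ∀ p q r, b2 p q = true → b2 r q = false → b2 p r = true)
    (xs : List α) : sortB bc xs = sortB b1 (sortB b2 xs) := by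
  induction xs using List.reverseRecOn with
  | nil => rfl
  | append_singleton xs x ih =>
      rw [sortB_append, sortB_append]
      simp only [List.foldl_cons, List.foldl_nil]
      rw [ih, sortB_insert hbc ha1 ht1 ht2 x _ (sortB_pairwise ha2 ht2 xs)]

-- ===== bridging PySem.List.sorted to sortB, and the two comparator families =====

theorem sorted_eq_sortB {α κ : Type} [LT κ] [DecidableLT κ] (xs : List α) (key : α → κ) (rev : Bool) :
    PySem.List.sorted xs key rev =
      sortB (fun a b => if rev then decide (key b < key a) else decide (key a < key b)) xs := by
  cases rev
  · simpa [sortB] using PySem.List.sorted_eq_foldl_insertBy xs key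
  · simpa [sortB] using PySem.List.sorted_rev_eq_foldl_insertBy xs key

theorem b1_asym {α : Type} (k : α → Int) (rev : Bool) (p q : α) :
    (if rev then decide (k q < k p) else decide (k p < k q)) = true →
    (if rev then decide (k p < k q) else decide (k q < k p)) = false := by
  cases rev <;> simp <;> omega

theorem b1_trans {α : Type} (k : α → Int) (rev : Bool) (p q r : α) :
    (if rev then decide (k q < k p) else decide (k p < k q)) = true →
    (if rev then decide (k q < k r) else decide (k r < k q)) = false →
    (if rev then decide (k r < k p) else decide (k p < k r)) = true := by
  cases rev <;> simp <;> omega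

theorem b2_asym {α : Type} (kr : α → List Int) (rev : Bool) (p q : α) :
    (if rev then decide (kr q < kr p) else decide (kr p < kr q)) = true →
    (if rev then decide (kr p < kr q) else decide (kr q < kr p)) = false := by
  cases rev <;>
    · simp
      exact fun h => le_of_lt h

theorem b2_trans {α : Type} (kr : α → List Int) (rev : Bool) (p q r : α) :
    (if rev then decide (kr q < kr p) else decide (kr p < kr q)) = true →
    (if rev then decide (kr q < kr r) else decide (kr r < kr q)) = false →
    (if rev then decide (kr r < kr p) else decide (kr p < kr r)) = true := by
  cases rev
  · simp
    exact fun h h' => lt_of_lt_of_le h h'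
  · simp
    exact fun h h' => lt_of_le_of_lt h' h

-- The lexicographic comparator on (k it :: kr it) is the Boolean lex combination of the
-- single-key comparators (Python's tuple comparison, one level).
theorem comp_lex {α : Type} (g : α → String → Int) (c : String) (kr : α → List Int) (rev : Bool)
    (x y : α) :
    (if rev then decide ((g y c :: kr y) < (g x c :: kr x))
     else decide ((g x c :: kr x) < (g y c :: kr y))) =
    ((if rev then decide (g y c < g x c) else decide (g x c < g y c)) ||
      (!(if rev then decide (g y c < g x c) else decide (g x c < g y c)) &&
       !(if rev then decide (g x c < g y c) else decide (g y c < g x c)) &&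
       (if rev then decide (kr y < kr x) else decide (kr x < kr y)))) := by
  cases rev
  · rcases lt_trichotomy (g x c) (g y c) with h | h | h
    · have h2 : ¬ g y c < g x c := by omega
      simp [List.cons_lt_cons_iff, h, h2]
    · have h1 : ¬ g x c < g y c := by omega
      have h2 : ¬ g y c < g x c := by omega
      simp [List.cons_lt_cons_iff, h1, h2, h]
    · have h1 : ¬ g x c < g y c := by omega
      have hne : g x c ≠ g y c := by omega
      simp [List.cons_lt_cons_iff, h1, h, hne]
  · rcases lt_trichotomy (g y c) (g x c) with h | h | h
    · have h2 : ¬ g x c < g y c := by omega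
      simp [List.cons_lt_cons_iff, h, h2]
    · have h1 : ¬ g y c < g x c := by omega
      have h2 : ¬ g x c < g y c := by omega
      simp [List.cons_lt_cons_iff, h1, h2, h]
    · have h1 : ¬ g y c < g x c := by omega
      have hne : g y c ≠ g x c := by omega
      simp [List.cons_lt_cons_iff, h1, h, hne]

-- One pass of B equals sortB with the single-key comparator.
theorem pass_eq_sortB (reverse : Bool) (c : String) (items : List (String × List (String × Int))) :
    items.foldl (fun out it => pvIns reverse c it out) [] =
      sortB (fun a y => if reverse
          then decide (PySem.Dict.getD (PySem.Dict.ofList y.2) c 0 < PySem.Dict.getD (PySem.Dict.ofList a.2) c 0)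
          else decide (PySem.Dict.getD (PySem.Dict.ofList a.2) c 0 < PySem.Dict.getD (PySem.Dict.ofList y.2) c 0))
        items := by
  unfold sortB
  apply PySem.List.foldl_congr_mem
  intro acc it _
  exact pvIns_eq_insertBy reverse c it acc

theorem main_core (g : (String × List (String × Int)) → String → Int) (cles : List String) (rev : Bool)
    (xs : List (String × List (String × Int))) :
    PySem.List.sorted xs (fun it => cles.map (fun c => g it c)) rev =
      cles.reverse.foldl (fun items c => sortB (fun a y => if rev then decide (g y c < g a c) else decide (g a c < g y c)) items) xs := by
  induction cles generalizing xs with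
  | nil =>
      simp only [List.map_nil, List.reverse_nil, List.foldl_nil]
      cases rev
      · exact PySem.List.sorted_eq_self_of_pairwise xs _
          (List.pairwise_of_forall (fun _ _ => le_refl _))
      · exact PySem.List.sorted_rev_eq_self_of_pairwise xs _
          (List.pairwise_of_forall (fun _ _ => le_refl _))
  | cons c rest ih =>
      simp only [List.map_cons, List.reverse_cons, List.foldl_append, List.foldl_cons,
        List.foldl_nil]
      rw [← ih xs, sorted_eq_sortB, sorted_eq_sortB xs
        (fun it => rest.map (fun c' => g it c')) rev]
      exact sortB_lex (comp_lex g c (fun it => rest.map (fun c' => g it c')) rev)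
        (b1_asym (fun it => g it c) rev) (b1_trans (fun it => g it c) rev)
        (b2_asym (fun it => rest.map (fun c' => g it c')) rev)
        (b2_trans (fun it => rest.map (fun c' => g it c')) rev) xs

-- ===== VERDICT (by name: the statement is the Claim_ definition above) =====
theorem trier_dict_spec : Claim_equal_trier_dict := by
  intro data cles reverse _ _
  unfold Spec_trier_dict trier_dict trier_dict_alt
  rw [main_core (fun it c => PySem.Dict.getD (PySem.Dict.ofList it.2) c 0)]
  congr 1
  congr 1
  apply PySem.List.foldl_congr_mem
  intro items c _
  exact (pass_eq_sortB reverse c items).symm
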